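-- pv_equiv track=rewrite | github.com/Runte-RSS/rss | generate_feed.py | mime_for_url
-- ===== SOURCE A (Python) =====
-- MIME_BY_EXT = {
--     ".jpg": "image/jpeg",
--     ".jpeg": "image/jpeg",
--     ".png": "image/png",
--     ".gif": "image/gif",
--     ".webp": "image/webp",
--     ".svg": "image/svg+xml",
-- }
--
-- def mime_for_url(url):
--     if not url:
--         return "image/jpeg"
--     u = url.lower().split("?")[0].split("#")[0]
--     for ext, m in MIME_BY_EXT.items():
--         if u.endswith(ext):
--             return m
--     return "image/jpeg"
-- ===== SOURCE B (Python) =====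
-- MIME_BY_EXT = {
--     ".jpg": "image/jpeg",
--     ".jpeg": "image/jpeg",
--     ".png": "image/png",
--     ".gif": "image/gif",
--     ".webp": "image/webp",
--     ".svg": "image/svg+xml",
-- }
--
-- def mime_for_url(url):
--     if not url:
--         return "image/jpeg"
--     u = url.lower().split("?")[0].split("#")[0]
--     i = u.rfind(".")
--     ext = u[i:] if i != -1 else ""
--     return MIME_BY_EXT.get(ext, "image/jpeg")
-- ===== Notes on version B (the rewrite author's own statement) =====
-- stated objective: idiomatic
-- what changed: B replaces A's linear suffix-scan over the six-entry extension table (one endswith per entry) by extracting the last dotted segment once with rfind+slice and doing a single dict lookup with a default.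
import Mathlib
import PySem

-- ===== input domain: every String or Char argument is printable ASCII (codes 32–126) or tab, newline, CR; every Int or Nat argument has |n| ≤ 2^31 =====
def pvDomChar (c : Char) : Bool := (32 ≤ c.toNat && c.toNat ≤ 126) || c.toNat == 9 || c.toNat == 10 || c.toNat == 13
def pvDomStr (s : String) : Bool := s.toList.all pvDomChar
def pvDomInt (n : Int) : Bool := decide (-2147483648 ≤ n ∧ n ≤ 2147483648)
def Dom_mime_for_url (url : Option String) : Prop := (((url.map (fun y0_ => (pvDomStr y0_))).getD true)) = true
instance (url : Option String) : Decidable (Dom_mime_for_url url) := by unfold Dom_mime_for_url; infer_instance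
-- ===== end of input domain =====

-- B replaces A's suffix-scan over the extension table by extracting the last dotted
-- segment once (rfind + slice) and doing a single dict lookup (objective: idiomatic).

-- ===== PORT A =====
-- MIME_BY_EXT, in insertion order
def pvMimeItems : List (String × String) :=
  [(".jpg", "image/jpeg"), (".jpeg", "image/jpeg"), (".png", "image/png"),
   (".gif", "image/gif"), (".webp", "image/webp"), (".svg", "image/svg+xml")]

-- u = url.lower().split("?")[0].split("#")[0]
def pvNormalizeA (url : String) : String :=
  PySem.List.pyGetD
    ((PySem.Str.split?
        (PySem.List.pyGetD ((PySem.Str.split? (PySem.Str.lower url) "?").getD []) 0 "")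
        "#").getD []) 0 ""

-- for ext, m in MIME_BY_EXT.items(): if u.endswith(ext): return m / fall-through default
def pvMimeLoopA (u : String) : List (String × String) → String
  | [] => "image/jpeg"
  | (ext, m) :: rest => if PySem.Str.endswith u ext then m else pvMimeLoopA u rest

def mime_for_url (url : Option String) : String :=
  match url with
  | none => "image/jpeg"
  | some url =>
    if url = "" then "image/jpeg"
    else pvMimeLoopA (pvNormalizeA url) pvMimeItems

-- ===== PORT B =====
-- u = url.lower().split("?")[0].split("#")[0]  (same line of Python as in A)
def pvNormalizeB (url : String) : String :=
  PySem.List.pyGetD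
    ((PySem.Str.split?
        (PySem.List.pyGetD ((PySem.Str.split? (PySem.Str.lower url) "?").getD []) 0 "")
        "#").getD []) 0 ""

def mime_for_url_alt (url : Option String) : String :=
  match url with
  | none => "image/jpeg"
  | some url =>
    if url = "" then "image/jpeg"
    else
      let u := pvNormalizeB url
      let i := PySem.Str.rfind u "."
      let ext := if i ≠ -1 then PySem.Str.slice u (some i) none else ""
      PySem.Dict.getD (PySem.Dict.ofList pvMimeItems) ext "image/jpeg"

-- ===== PRECONDITION & SPEC =====
def Spec_mime_for_url (url : Option String) (out : String) : Prop := out = mime_for_url_alt url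
instance (url : Option String) (out : String) : Decidable (Spec_mime_for_url url out) := by unfold Spec_mime_for_url; infer_instance

-- ===== CLAIM (what is proved, stated in full; the proofs are below) =====
def Claim_equal_mime_for_url : Prop := ∀ (url : Option String), Dom_mime_for_url url → Spec_mime_for_url url (mime_for_url url)

-- ===== LEMMAS AND PROOFS =====

-- the extension B extracts, on the character-list side
def pvExtC (cs : List Char) : List Char :=
  if PySem.Chars.rfind cs ['.'] = -1 then [] else cs.drop (PySem.Chars.rfind cs ['.']).toNat

lemma pv_go_ge (s sub : List Char) (n : ℕ) : -1 ≤ PySem.Chars.rfind.go s sub n := by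
  induction n with
  | zero => simp [PySem.Chars.rfind.go]; split <;> omega
  | succ j ih => simp [PySem.Chars.rfind.go]; split <;> omega

lemma pv_go_max (s sub : List Char) (n k : ℕ) (hk : k ≤ n) (hpre : sub <+: s.drop k)
    (hmax : ∀ j : ℕ, k < j → j ≤ n → ¬ sub <+: s.drop j) :
    PySem.Chars.rfind.go s sub n = k := by
  induction n with
  | zero =>
    interval_cases k
    simp_all [PySem.Chars.rfind.go, List.isPrefixOf_iff_prefix]
  | succ j ih =>
    by_cases h : sub <+: s.drop (j + 1)
    · have hkj : k = j + 1 := by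
        by_contra hne
        exact hmax (j + 1) (by omega) (le_refl _) h
      subst hkj
      simp [PySem.Chars.rfind.go, List.isPrefixOf_iff_prefix, h]
    · have hkj : k ≤ j := by
        rcases Nat.lt_or_ge k (j + 1) with h1 | h1
        · omega
        · exact absurd hpre (by have := Nat.le_antisymm hk h1; subst this; exact h)
      simp only [PySem.Chars.rfind.go, List.isPrefixOf_iff_prefix]
      rw [if_neg h]
      exact ih hkj (fun j' h1 h2 => hmax j' h1 (by omega))

lemma pv_rfind_dotless (v t : List Char) (ht : '.' ∉ t) :
    PySem.Chars.rfind (v ++ '.' :: t) ['.'] = (v.length : ℤ) := by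
  have hlen : (v ++ '.' :: t).length = v.length + 1 + t.length := by simp; omega
  have := pv_go_max (v ++ '.' :: t) ['.'] ((v ++ '.' :: t).length) v.length
    (by omega)
    (by rw [List.drop_left]; exact ⟨t, rfl⟩)
    (by
      intro j h1 h2 hpre
      have hmem : '.' ∈ (v ++ '.' :: t).drop j := hpre.subset (by simp)
      have hdrop : (v ++ '.' :: t).drop j = t.drop (j - v.length - 1) := by
        rw [show v ++ '.' :: t = (v ++ ['.']) ++ t by simp, List.drop_append,
            List.drop_eq_nil_of_le (by simp; omega), List.nil_append]
        congr 1
        simp [Nat.sub_sub]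
      rw [hdrop] at hmem
      exact ht (List.mem_of_mem_drop hmem))
  simpa [PySem.Chars.rfind] using this

lemma pv_ends_iff (cs t : List Char) (ht : '.' ∉ t) :
    PySem.Chars.endswith cs ('.' :: t) = true ↔ pvExtC cs = '.' :: t := by
  constructor
  · intro h
    obtain ⟨v, hv⟩ := (PySem.Chars.endswith_iff cs ('.' :: t)).mp h
    subst hv
    have hr := pv_rfind_dotless v t ht
    simp [pvExtC, hr]
  · intro h
    have hne : PySem.Chars.rfind cs ['.'] ≠ -1 := by
      intro hc; simp [pvExtC, hc] at h
    have hsuf : pvExtC cs <:+ cs := by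
      simp [pvExtC, hne]; exact List.drop_suffix _ _
    rw [h] at hsuf
    exact (PySem.Chars.endswith_iff cs ('.' :: t)).mpr hsuf

lemma pv_ext_toList (u : String) :
    (if PySem.Str.rfind u "." ≠ -1 then PySem.Str.slice u (some (PySem.Str.rfind u ".")) none else "").toList
      = pvExtC u.toList := by
  by_cases h : PySem.Str.rfind u "." = -1
  · have hc : PySem.Chars.rfind u.toList ['.'] = -1 := by
      simpa [PySem.Str.rfind_eq] using h
    simp [pvExtC, hc]
  · have hge : 0 ≤ PySem.Str.rfind u "." := by
      have := pv_go_ge u.toList ".".toList u.toList.length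
      simp only [PySem.Str.rfind_eq, PySem.Chars.rfind] at h ⊢
      omega
    rw [if_pos h, PySem.Str.toList_slice]
    have hch : PySem.Chars.rfind u.toList ['.'] = PySem.Str.rfind u "." := by
      rw [PySem.Str.rfind_eq]; rfl
    simp only [pvExtC, hch]
    rw [if_neg h, PySem.Chars.slice_eq_listSlice, PySem.List.slice_from _ hge]

lemma pv_getD_items (k : String) :
    PySem.Dict.getD (PySem.Dict.ofList pvMimeItems) k "image/jpeg" =
      (if k = ".svg" then "image/svg+xml" else if k = ".webp" then "image/webp"
       else if k = ".gif" then "image/gif" else if k = ".png" then "image/png"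
       else if k = ".jpeg" then "image/jpeg" else if k = ".jpg" then "image/jpeg"
       else "image/jpeg") := by
  simp [pvMimeItems, PySem.Dict.ofList, PySem.Dict.update, PySem.Dict.getD_insert,
        PySem.Dict.getD_empty]

lemma pv_core (u : String) :
    pvMimeLoopA u pvMimeItems
      = PySem.Dict.getD (PySem.Dict.ofList pvMimeItems)
          (if PySem.Str.rfind u "." ≠ -1 then PySem.Str.slice u (some (PySem.Str.rfind u ".")) none else "")
          "image/jpeg" := by
  set ext := (if PySem.Str.rfind u "." ≠ -1 then PySem.Str.slice u (some (PySem.Str.rfind u ".")) none else "") with hext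
  have hlist := pv_ext_toList u
  rw [← hext] at hlist
  have hiff : ∀ t : List Char, '.' ∉ t →
      (PySem.Chars.endswith u.toList ('.' :: t) = true ↔ ext.toList = '.' :: t) := by
    intro t ht
    rw [hlist]; exact pv_ends_iff u.toList t ht
  have hjpg := hiff "jpg".toList (by decide)
  have hjpeg := hiff "jpeg".toList (by decide)
  have hpng := hiff "png".toList (by decide)
  have hgif := hiff "gif".toList (by decide)
  have hwebp := hiff "webp".toList (by decide)
  have hsvg := hiff "svg".toList (by decide)
  rw [show ('.' :: "jpg".toList) = ".jpg".toList from rfl] at hjpg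
  rw [show ('.' :: "jpeg".toList) = ".jpeg".toList from rfl] at hjpeg
  rw [show ('.' :: "png".toList) = ".png".toList from rfl] at hpng
  rw [show ('.' :: "gif".toList) = ".gif".toList from rfl] at hgif
  rw [show ('.' :: "webp".toList) = ".webp".toList from rfl] at hwebp
  rw [show ('.' :: "svg".toList) = ".svg".toList from rfl] at hsvg
  have hstr : ∀ (e : String), ext.toList = e.toList ↔ ext = e := by
    intro e; exact ⟨String.ext, fun h => h ▸ rfl⟩
  rw [pv_getD_items ext]
  simp only [pvMimeItems, pvMimeLoopA, PySem.Str.endswith_eq]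
  by_cases h1 : ext = ".jpg"
  · rw [if_pos (hjpg.mpr ((hstr ".jpg").mpr h1))]; simp [h1]
  rw [if_neg (fun he => h1 ((hstr ".jpg").mp (hjpg.mp he)))]
  by_cases h2 : ext = ".jpeg"
  · rw [if_pos (hjpeg.mpr ((hstr ".jpeg").mpr h2))]; simp [h2]
  rw [if_neg (fun he => h2 ((hstr ".jpeg").mp (hjpeg.mp he)))]
  by_cases h3 : ext = ".png"
  · rw [if_pos (hpng.mpr ((hstr ".png").mpr h3))]; simp [h3]
  rw [if_neg (fun he => h3 ((hstr ".png").mp (hpng.mp he)))]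
  by_cases h4 : ext = ".gif"
  · rw [if_pos (hgif.mpr ((hstr ".gif").mpr h4))]; simp [h4]
  rw [if_neg (fun he => h4 ((hstr ".gif").mp (hgif.mp he)))]
  by_cases h5 : ext = ".webp"
  · rw [if_pos (hwebp.mpr ((hstr ".webp").mpr h5))]; simp [h5]
  rw [if_neg (fun he => h5 ((hstr ".webp").mp (hwebp.mp he)))]
  by_cases h6 : ext = ".svg"
  · rw [if_pos (hsvg.mpr ((hstr ".svg").mpr h6))]; simp [h6]
  rw [if_neg (fun he => h6 ((hstr ".svg").mp (hsvg.mp he)))]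
  -- no key matches: both sides are the default
  simp [h1, h2, h3, h4, h5, h6]

-- ===== VERDICT (by name: the statement is the Claim_ definition above) =====
theorem mime_for_url_spec : Claim_equal_mime_for_url := by
  intro url _
  unfold Spec_mime_for_url mime_for_url mime_for_url_alt
  cases url with
  | none => rfl
  | some s =>
    by_cases h : s = ""
    · simp [h]
    · simp only [if_neg h]
      have hnorm : pvNormalizeA s = pvNormalizeB s := rfl
      rw [hnorm]
      exact pv_core (pvNormalizeB s)
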